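-- pv_equiv track=rewrite | github.com/KhaiTan6/COMP10001 | Project 1/main.py | smallest_first
-- ===== SOURCE A (Python) =====
-- def smallest_first(capacity, bookings):
--     """Takes a number for capacity and a list for bookings. It then returns the
--     total number of diners within the capacity, starting from smallest group
--     first."""
--
--     # sort the number of diners from smallest to largest according to size
--     booking_quantity = []
--     for tup in bookings:
--         booking_quantity.append(tup[1])
--     booking_quantity_sorted = sorted(booking_quantity)
--
--     # sum up the number of diners according to group without exceeding capacity
--     max_cap = 0
--     for num in booking_quantity_sorted:
--         if max_cap + num <= capacity:
--                 max_cap += num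
--     return max_cap
-- ===== SOURCE B (Python) =====
-- def smallest_first(capacity, bookings):
--     """Prefix-sum table formulation: build the cumulative sums of the
--     ascending group sizes, then the answer is the last prefix sum that
--     still fits within capacity (the sort makes later additions fail once
--     one does, so the first crossing ends the scan)."""
--     prefix_sums = []
--     running = 0
--     for size in sorted(t[1] for t in bookings):
--         running += size
--         prefix_sums.append(running)
--     total = 0
--     for p in prefix_sums:
--         if p > capacity:
--             break
--         total = p
--     return total
-- ===== Notes on version B (the rewrite author's own statement) =====
-- stated objective: alternative
-- what changed: Replaces A's conditional running-total greedy (which tests and conditionally adds every element) with a build-the-prefix-sum-table pass followed by a first-crossing scan that stops at the first prefix sum exceeding capacity, returning the last fitting prefix sum.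
import Mathlib
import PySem

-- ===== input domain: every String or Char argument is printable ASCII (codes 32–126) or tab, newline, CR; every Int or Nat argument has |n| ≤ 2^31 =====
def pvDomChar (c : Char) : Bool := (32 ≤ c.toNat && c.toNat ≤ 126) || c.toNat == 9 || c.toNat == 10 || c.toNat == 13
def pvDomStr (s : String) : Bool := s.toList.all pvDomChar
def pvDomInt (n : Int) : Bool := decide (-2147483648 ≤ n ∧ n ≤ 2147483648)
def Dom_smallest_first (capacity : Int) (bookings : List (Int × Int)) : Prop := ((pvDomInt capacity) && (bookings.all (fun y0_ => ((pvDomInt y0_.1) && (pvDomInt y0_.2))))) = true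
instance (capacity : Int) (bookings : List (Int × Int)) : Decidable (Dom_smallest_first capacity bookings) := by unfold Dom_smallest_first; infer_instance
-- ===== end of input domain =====

-- B replaces A's conditional running-total greedy with a prefix-sum table plus a
-- first-crossing scan; same O(n log n) cost, alternative decomposition.

-- ===== PORT A =====
def smallest_first (capacity : Int) (bookings : List (Int × Int)) : Int :=
  let booking_quantity := bookings.foldl (fun acc tup => acc ++ [tup.2]) []
  let booking_quantity_sorted := PySem.List.sorted booking_quantity (fun x => x) false
  booking_quantity_sorted.foldl (fun max_cap num => if max_cap + num ≤ capacity then max_cap + num else max_cap) 0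

-- ===== PORT B =====
-- first loop of Source B: state `running`, emits the prefix sums
def altPrefix (xs : List Int) (running : Int) : List Int :=
  match xs with
  | [] => []
  | s :: rest => (running + s) :: altPrefix rest (running + s)

-- second loop of Source B: `total` accumulator with the `break` at the first crossing
def altScan (ps : List Int) (capacity : Int) (total : Int) : Int :=
  match ps with
  | [] => total
  | p :: rest => if p > capacity then total else altScan rest capacity p

def smallest_first_alt (capacity : Int) (bookings : List (Int × Int)) : Int :=
  altScan (altPrefix (PySem.List.sorted (bookings.map (fun t => t.2)) (fun x => x) false) 0) capacity 0

-- ===== PRECONDITION & SPEC =====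
def Spec_smallest_first (capacity : Int) (bookings : List (Int × Int)) (out : Int) : Prop := out = smallest_first_alt capacity bookings
instance (capacity : Int) (bookings : List (Int × Int)) (out : Int) : Decidable (Spec_smallest_first capacity bookings out) := by unfold Spec_smallest_first; infer_instance

-- ===== CLAIM (what is proved, stated in full; the proofs are below) =====
def Claim_equal_smallest_first : Prop := ∀ (capacity : Int) (bookings : List (Int × Int)), Dom_smallest_first capacity bookings → Spec_smallest_first capacity bookings (smallest_first capacity bookings)

-- ===== LEMMAS AND PROOFS =====

-- A's append loop builds the map of second components
theorem foldl_append_snd (bookings : List (Int × Int)) (acc : List Int) :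
    bookings.foldl (fun acc tup => acc ++ [tup.2]) acc = acc ++ bookings.map (fun t => t.2) := by
  induction bookings generalizing acc with
  | nil => simp
  | cons t rest ih => simp [List.foldl, ih]

-- once every remaining element overflows, A's fold is frozen
theorem foldA_frozen (capacity : Int) (L : List Int) (acc : Int)
    (h : ∀ y ∈ L, ¬ acc + y ≤ capacity) :
    L.foldl (fun max_cap num => if max_cap + num ≤ capacity then max_cap + num else max_cap) acc = acc := by
  induction L with
  | nil => rfl
  | cons x rest ih =>
      simp only [List.foldl, if_neg (h x (by simp))]
      exact ih (fun y hy => h y (by simp [hy]))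

-- on a sorted list, A's greedy fold equals B's prefix-table scan
theorem foldA_eq_scan (capacity : Int) (L : List Int) (acc : Int)
    (hs : L.Pairwise (· ≤ ·)) :
    L.foldl (fun max_cap num => if max_cap + num ≤ capacity then max_cap + num else max_cap) acc
      = altScan (altPrefix L acc) capacity acc := by
  induction L generalizing acc with
  | nil => rfl
  | cons x rest ih =>
      rcases List.pairwise_cons.mp hs with ⟨hx, hrest⟩
      by_cases h : acc + x ≤ capacity
      · simp only [List.foldl, altPrefix, altScan, if_pos h, if_neg (by omega : ¬ acc + x > capacity)]
        exact ih (acc + x) hrest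
      · simp only [List.foldl, altPrefix, altScan, if_neg h, if_pos (by omega : acc + x > capacity)]
        exact foldA_frozen capacity rest acc (fun y hy => by have := hx y hy; omega)

-- ===== VERDICT (by name: the statement is the Claim_ definition above) =====
theorem smallest_first_spec : Claim_equal_smallest_first := by
  intro capacity bookings _
  unfold Spec_smallest_first smallest_first smallest_first_alt
  rw [foldl_append_snd bookings []]
  simp only [List.nil_append]
  exact foldA_eq_scan capacity _ 0
    (by simpa using PySem.List.sorted_pairwise (bookings.map (fun t => t.2)) (fun x => x))
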